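-- pv_equiv track=rewrite | github.com/NiklasSchweiger/trust-region-noise-search | noise_optimization/core/benchmarks/t2i.py | _fix_split_prompts
-- ===== SOURCE A (Python) =====
-- from typing import List, Dict, Any, Optional
--
-- def _fix_split_prompts(prompts: List[str]) -> List[str]:
--     """Fix prompts that were incorrectly split by Hydra's comma parsing.
--
--     When Hydra parses a list from command line like:
--         benchmark.prompts=["Prompt1, with commas", "Prompt2, with commas"]
--
--     It splits on ALL commas, treating each comma-separated part as a separate item:
--         ["Prompt1", " with commas", "Prompt2", " with commas"]
--
--     Solution: Join everything back together and split at quotes to get actual prompts.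
--     """
--     if not prompts:
--         return prompts
--
--     # Join all items with commas (reconstructing the original string)
--     joined = ", ".join(prompts)
--
--     # Split by quotes to get individual prompts.
--     # Try double quotes first, then single quotes; use whichever produces more splits.
--     parts_double = joined.split('"')
--     parts_single = joined.split("'")
--
--     if len(parts_double) > len(parts_single):
--         parts = parts_double
--     else:
--         parts = parts_single
--
--     # Extract prompts (odd-indexed tokens are the quoted content)
--     fixed = []
--     for i in range(1, len(parts), 2):
--         if i < len(parts):
--             prompt = parts[i].strip()
--             if prompt:
--                 fixed.append(prompt)
--
--     # If no quoted prompts found, return original (e.g. prompts came from a config file)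
--     return fixed if fixed else prompts
-- ===== SOURCE B (Python) =====
-- from typing import List
--
-- def _fix_split_prompts(prompts: List[str]) -> List[str]:
--     """Single left-to-right scan over the rejoined string with an inside-quotes flag,
--     instead of split + odd-index extraction."""
--     if not prompts:
--         return prompts
--
--     joined = ", ".join(prompts)
--
--     # The quote char that produces more splits is the one occurring more often.
--     q = '"' if joined.count('"') > joined.count("'") else "'"
--
--     fixed = []
--     buf = []
--     inside = False
--     for ch in joined:
--         if ch == q:
--             if inside:
--                 seg = "".join(buf).strip()
--                 if seg:
--                     fixed.append(seg)
--             buf = []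
--             inside = not inside
--         elif inside:
--             buf.append(ch)
--     if inside:
--         seg = "".join(buf).strip()
--         if seg:
--             fixed.append(seg)
--
--     return fixed if fixed else prompts
-- ===== Notes on version B (the rewrite author's own statement) =====
-- stated objective: alternative
-- what changed: Replaces split-on-quote-then-take-odd-indexed-parts with a single left-to-right scan over the rejoined string that toggles an inside-quotes flag (quote char chosen by comparing quote counts instead of split lengths) and emits stripped nonempty segments, including the trailing buffer after an unterminated final quote.
import Mathlib
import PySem

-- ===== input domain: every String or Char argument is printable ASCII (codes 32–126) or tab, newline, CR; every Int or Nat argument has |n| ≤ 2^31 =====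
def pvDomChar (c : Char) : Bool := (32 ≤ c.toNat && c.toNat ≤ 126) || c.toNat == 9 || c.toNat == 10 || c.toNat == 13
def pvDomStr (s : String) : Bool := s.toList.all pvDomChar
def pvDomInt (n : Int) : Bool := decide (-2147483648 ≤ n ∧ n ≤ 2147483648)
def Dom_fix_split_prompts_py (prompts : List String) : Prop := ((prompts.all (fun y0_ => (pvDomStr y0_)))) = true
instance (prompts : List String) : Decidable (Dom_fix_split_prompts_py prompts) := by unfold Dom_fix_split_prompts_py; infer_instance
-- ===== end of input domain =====

-- B replaces A's split-then-take-odd-indices reconstruction by a single left-to-right scan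
-- with an inside-quotes flag (objective: alternative decomposition, same cost).

-- ===== PORT A =====
def fix_split_prompts_py (prompts : List String) : List String :=
  if prompts = [] then prompts
  else
    let joined := PySem.Str.join ", " prompts
    let partsDouble := PySem.Chars.splitOn joined.toList ['"']
    let partsSingle := PySem.Chars.splitOn joined.toList ['\'']
    let parts := if partsDouble.length > partsSingle.length then partsDouble else partsSingle
    let fixed := (PySem.List.pyRange 1 (parts.length : Int) 2).foldl
      (fun acc i =>
        if i < (parts.length : Int) then
          let prompt := PySem.Chars.strip (PySem.List.pyGetD parts i [])
          if prompt ≠ [] then acc ++ [String.ofList prompt] else acc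
        else acc) []
    if fixed = [] then prompts else fixed

-- ===== PORT B =====
-- the loop body of B's scan: state = (inside, current buffer, collected prompts)
def scanStep (q : Char) (st : Bool × List Char × List String) (ch : Char) :
    Bool × List Char × List String :=
  match st with
  | (inside, buf, fixed) =>
    if ch = q then
      if inside then
        let seg := PySem.Chars.strip buf
        (false, [], if seg ≠ [] then fixed ++ [String.ofList seg] else fixed)
      else (true, [], fixed)
    else if inside then (true, buf ++ [ch], fixed) else (false, buf, fixed)

-- B's post-loop step: emit the trailing buffer if the string ended inside quotes
def scanFinish (st : Bool × List Char × List String) : List String :=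
  match st with
  | (inside, buf, fixed) =>
    if inside then
      let seg := PySem.Chars.strip buf
      if seg ≠ [] then fixed ++ [String.ofList seg] else fixed
    else fixed

def fix_split_prompts_py_alt (prompts : List String) : List String :=
  if prompts = [] then prompts
  else
    let joined := PySem.Str.join ", " prompts
    let q : Char := if PySem.Str.count joined "\"" > PySem.Str.count joined "'" then '"' else '\''
    let fixed := scanFinish (joined.toList.foldl (scanStep q) (false, [], []))
    if fixed = [] then prompts else fixed

-- ===== PRECONDITION & SPEC =====
def Spec_fix_split_prompts_py (prompts : List String) (out : List String) : Prop := out = fix_split_prompts_py_alt prompts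
instance (prompts : List String) (out : List String) : Decidable (Spec_fix_split_prompts_py prompts out) := by unfold Spec_fix_split_prompts_py; infer_instance

-- ===== CLAIM (what is proved, stated in full; the proofs are below) =====
def Claim_equal_fix_split_prompts_py : Prop := ∀ (prompts : List String), Dom_fix_split_prompts_py prompts → Spec_fix_split_prompts_py prompts (fix_split_prompts_py prompts)

-- ===== LEMMAS AND PROOFS =====

-- structural single-char split: csp q l = (first segment, remaining segments)
def csp (q : Char) : List Char → List Char × List (List Char)
  | [] => ([], [])
  | c :: cs =>
    let r := csp q cs
    if c = q then ([], r.1 :: r.2) else (c :: r.1, r.2)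

-- the stripped, nonempty-filtered emission both programs perform on a segment
def emitStrip (s : List Char) : List String :=
  if PySem.Chars.strip s ≠ [] then [String.ofList (PySem.Chars.strip s)] else []

def oddElems {α : Type} : List α → List α
  | [] => []
  | [_] => []
  | _ :: h :: t => h :: oddElems t

-- what B's scan produces from the split segments, given the mode and pending buffer
def emitM : Bool → List Char → List (List Char) → List String
  | _, _, [] => []
  | true, buf, h :: t => emitStrip (buf ++ h) ++ emitM false [] t
  | false, _, _ :: t => emitM true [] t

-- A's loop body as a list-valued function of the index
def gA (parts : List (List Char)) (i : Int) : List String :=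
  if i < (parts.length : Int) then
    (if PySem.Chars.strip (PySem.List.pyGetD parts i []) ≠ [] then
      [String.ofList (PySem.Chars.strip (PySem.List.pyGetD parts i []))]
    else [])
  else []

theorem go_spec (q : Char) : ∀ (l : List Char) (fuel : Nat) (cur : List Char)
    (acc : List (List Char)), l.length ≤ fuel →
    PySem.Chars.splitOn.go [q] fuel l cur acc
      = acc.reverse ++ (cur.reverse ++ (csp q l).1) :: (csp q l).2 := by
  intro l
  induction l with
  | nil =>
    intro fuel cur acc _
    cases fuel <;> simp [PySem.Chars.splitOn.go, csp]
  | cons c rest ih =>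
    intro fuel cur acc hf
    cases fuel with
    | zero => simp at hf
    | succ f =>
      by_cases hq : c = q
      · subst hq
        simp only [PySem.Chars.splitOn.go, List.isPrefixOf, beq_self_eq_true,
          Bool.true_and, if_pos, List.length_cons, List.drop_succ_cons, List.length_nil,
          List.drop_zero]
        rw [ih f [] (cur.reverse :: acc) (by simpa using Nat.lt_succ_iff.mp (by simpa using hf))]
        simp [csp]
      · have hpre : ([q].isPrefixOf (c :: rest)) = false := by
          simp [List.isPrefixOf]; exact fun h => (hq h.symm).elim
        simp only [PySem.Chars.splitOn.go, hpre, Bool.false_eq_true, if_neg,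
          not_false_eq_true]
        rw [ih f (c :: cur) acc (by simpa using Nat.lt_succ_iff.mp (by simpa using hf))]
        simp [csp, hq]

theorem splitOn_csp (q : Char) (l : List Char) :
    PySem.Chars.splitOn l [q] = (csp q l).1 :: (csp q l).2 := by
  have := go_spec q l (l.length + 1) [] [] (by omega)
  simpa [PySem.Chars.splitOn] using this

theorem countgo_spec (q : Char) : ∀ (l : List Char) (fuel acc : Nat), l.length ≤ fuel →
    PySem.Chars.count.go [q] fuel l acc = acc + l.count q := by
  intro l
  induction l with
  | nil => intro fuel acc _; cases fuel <;> simp [PySem.Chars.count.go]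
  | cons c rest ih =>
    intro fuel acc hf
    cases fuel with
    | zero => simp at hf
    | succ f =>
      by_cases hq : c = q
      · subst hq
        simp only [PySem.Chars.count.go, List.isPrefixOf, beq_self_eq_true,
          Bool.true_and, if_pos, List.length_cons, List.drop_succ_cons, List.length_nil,
          List.drop_zero]
        rw [ih f (acc + 1) (by simpa using Nat.lt_succ_iff.mp (by simpa using hf))]
        simp; omega
      · have hpre : ([q].isPrefixOf (c :: rest)) = false := by
          simp [List.isPrefixOf]; exact fun h => (hq h.symm).elim
        simp only [PySem.Chars.count.go, hpre, Bool.false_eq_true, if_neg, not_false_eq_true]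
        rw [ih f acc (by simpa using Nat.lt_succ_iff.mp (by simpa using hf))]
        simp [hq]

theorem count_single (q : Char) (l : List Char) :
    PySem.Chars.count l [q] = l.count q := by
  have := countgo_spec q l l.length 0 (le_refl _)
  simpa [PySem.Chars.count] using this

theorem len_csp (q : Char) : ∀ (l : List Char), ((csp q l).2).length = l.count q := by
  intro l
  induction l with
  | nil => simp [csp]
  | cons c rest ih =>
    by_cases hq : c = q
    · subst hq; simp [csp, ih]
    · simp [csp, hq, ih]

theorem scan_spec (q : Char) : ∀ (cs : List Char) (inside : Bool) (buf : List Char)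
    (fixed : List String),
    scanFinish (cs.foldl (scanStep q) (inside, buf, fixed))
      = fixed ++ emitM inside buf ((csp q cs).1 :: (csp q cs).2) := by
  intro cs
  induction cs with
  | nil =>
    intro inside buf fixed
    cases inside <;>
      simp only [List.foldl_nil, scanFinish, csp, emitM, emitStrip, List.append_nil]
    · simp
    · split_ifs <;> simp
  | cons c rest ih =>
    intro inside buf fixed
    simp only [List.foldl_cons]
    by_cases hq : c = q
    · subst hq
      cases inside with
      | false =>
        have hstep : scanStep c (false, buf, fixed) c = (true, [], fixed) := by
          simp [scanStep]
        rw [hstep, ih]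
        simp [csp, emitM]
      | true =>
        have hstep : scanStep c (true, buf, fixed) c
            = (false, [], fixed ++ emitStrip buf) := by
          simp only [scanStep, emitStrip]
          split_ifs <;> simp_all
        rw [hstep, ih]
        simp [csp, emitM, emitStrip, List.append_assoc]
    · cases inside with
      | false =>
        have hstep : scanStep q (false, buf, fixed) c = (false, buf, fixed) := by
          simp [scanStep, hq]
        rw [hstep, ih]
        simp [csp, hq, emitM]
      | true =>
        have hstep : scanStep q (true, buf, fixed) c = (true, buf ++ [c], fixed) := by
          simp [scanStep, hq]
        rw [hstep, ih]
        simp [csp, hq, emitM, List.append_assoc]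

theorem emitM_false_eq : ∀ (parts : List (List Char)) (buf : List Char),
    emitM false buf parts = (oddElems parts).flatMap emitStrip
  | [], _ => by simp [emitM, oddElems]
  | [x], _ => by simp [emitM, oddElems]
  | x :: h :: t, buf => by
    simp [emitM, oddElems, emitM_false_eq t []]

theorem gA_shift (x h : List Char) (t : List (List Char)) (j : Nat) :
    gA (x :: h :: t) (1 + 2 * ((j : Int) + 1)) = gA t (1 + 2 * (j : Int)) := by
  have hidx : PySem.List.pyGetD (x :: h :: t) (1 + 2 * ((j : Int) + 1)) ([] : List Char)
      = PySem.List.pyGetD t (1 + 2 * (j : Int)) ([] : List Char) := by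
    rw [PySem.List.pyGetD_of_nonneg _ _ (by omega), PySem.List.pyGetD_of_nonneg _ _ (by omega)]
    have h1 : ((1 : Int) + 2 * ((j : Int) + 1)).toNat = ((1 + 2 * j) + 1) + 1 := by omega
    have h2 : ((1 : Int) + 2 * (j : Int)).toNat = 1 + 2 * j := by omega
    rw [h1, h2, List.getD_cons_succ, List.getD_cons_succ]
  by_cases hlt : (1 : Int) + 2 * (j : Int) < (t.length : Int)
  · have hlt' : (1 : Int) + 2 * ((j : Int) + 1) < ((x :: h :: t).length : Int) := by
      simp only [List.length_cons]; push_cast; omega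
    simp only [gA, if_pos hlt, if_pos hlt', hidx]
  · have hlt' : ¬ ((1 : Int) + 2 * ((j : Int) + 1) < ((x :: h :: t).length : Int)) := by
      simp only [List.length_cons]; push_cast; push_cast at hlt; omega
    simp only [gA, if_neg hlt, if_neg hlt']

theorem flatRange_odd : ∀ (parts : List (List Char)),
    (List.range (parts.length / 2)).flatMap (fun (j : Nat) => gA parts (1 + 2 * (j : Int)))
      = (oddElems parts).flatMap emitStrip
  | [] => by simp [oddElems]
  | [x] => by simp [oddElems]
  | x :: h :: t => by
    have hlen : (x :: h :: t).length / 2 = t.length / 2 + 1 := by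
      simp only [List.length_cons]; omega
    rw [hlen, List.range_succ_eq_map]
    have hmap : (List.map Nat.succ (List.range (t.length / 2))).flatMap
        (fun (j : Nat) => gA (x :: h :: t) (1 + 2 * (j : Int)))
        = (List.range (t.length / 2)).flatMap (fun (j : Nat) => gA t (1 + 2 * (j : Int))) := by
      rw [List.flatMap_map]
      refine List.flatMap_congr (fun j _ => ?_)
      have : ((Nat.succ j : Nat) : Int) = (j : Int) + 1 := by push_cast; ring
      rw [this, gA_shift]
    have h0 : gA (x :: h :: t) (1 + 2 * ((0 : Nat) : Int)) = emitStrip h := by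
      have hlt : (1 : Int) + 2 * ((0 : Nat) : Int) < ((x :: h :: t).length : Int) := by
        simp only [List.length_cons]; push_cast; omega
      have hget : PySem.List.pyGetD (x :: h :: t) (1 + 2 * ((0 : Nat) : Int)) ([] : List Char) = h := by
        rw [PySem.List.pyGetD_of_nonneg _ _ (by omega)]
        have : ((1 : Int) + 2 * ((0 : Nat) : Int)).toNat = 0 + 1 := by omega
        rw [this, List.getD_cons_succ, List.getD_cons_zero]
      simp only [gA, if_pos hlt, hget, emitStrip]
    rw [List.flatMap_cons, hmap, h0, flatRange_odd t]
    simp [oddElems]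

theorem A_loop (parts : List (List Char)) :
    (PySem.List.pyRange 1 (parts.length : Int) 2).foldl
      (fun acc i =>
        if i < (parts.length : Int) then
          let prompt := PySem.Chars.strip (PySem.List.pyGetD parts i [])
          if prompt ≠ [] then acc ++ [String.ofList prompt] else acc
        else acc) []
      = (oddElems parts).flatMap emitStrip := by
  rw [PySem.List.pyRange_of_pos 1 (parts.length : Int) (by omega)]
  have hK : (if (1 : Int) < (parts.length : Int)
      then (((parts.length : Int) - 1 + 2 - 1) / 2).toNat else 0) = parts.length / 2 := by
    split <;> omega
  rw [hK, List.foldl_map]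
  rw [PySem.List.foldl_congr_mem _ _ (fun (acc : List String) (j : Nat) => acc ++ gA parts (1 + 2 * (j : Int))) _
    (by
      intro acc j _
      simp only [gA]
      split
      · split <;> simp
      · simp)]
  rw [PySem.List.foldl_append_eq_flatMap]
  simpa using flatRange_odd parts

theorem main_core (q : Char) (l : List Char) :
    (PySem.List.pyRange 1 (((csp q l).1 :: (csp q l).2).length : Int) 2).foldl
      (fun acc i =>
        if i < ((((csp q l).1 :: (csp q l).2)).length : Int) then
          let prompt := PySem.Chars.strip (PySem.List.pyGetD ((csp q l).1 :: (csp q l).2) i [])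
          if prompt ≠ [] then acc ++ [String.ofList prompt] else acc
        else acc) []
      = scanFinish (l.foldl (scanStep q) (false, [], [])) := by
  rw [A_loop, scan_spec, ← emitM_false_eq _ []]
  simp

theorem fix_split_prompts_py_core : ∀ (prompts : List String),
    fix_split_prompts_py prompts = fix_split_prompts_py_alt prompts := by
  intro prompts
  by_cases hnil : prompts = []
  · simp [fix_split_prompts_py, fix_split_prompts_py_alt, hnil]
  · simp only [fix_split_prompts_py, fix_split_prompts_py_alt, if_neg hnil]
    set joined := PySem.Str.join ", " prompts with hj
    set l := joined.toList with hl
    have hcntD : PySem.Str.count joined "\"" = l.count '"' := by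
      rw [PySem.Str.count_eq]
      have : ("\"" : String).toList = ['"'] := rfl
      rw [this, count_single]
    have hcntS : PySem.Str.count joined "'" = l.count '\'' := by
      rw [PySem.Str.count_eq]
      have : ("'" : String).toList = ['\''] := rfl
      rw [this, count_single]
    have hlenD : (PySem.Chars.splitOn l ['"']).length = l.count '"' + 1 := by
      rw [splitOn_csp]; simp [len_csp]
    have hlenS : (PySem.Chars.splitOn l ['\'']).length = l.count '\'' + 1 := by
      rw [splitOn_csp]; simp [len_csp]
    by_cases hcmp : l.count '"' > l.count '\''
    · have hA : (PySem.Chars.splitOn l ['"']).length > (PySem.Chars.splitOn l ['\'']).length := by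
        omega
      have hB : PySem.Str.count joined "\"" > PySem.Str.count joined "'" := by
        rw [hcntD, hcntS]; exact hcmp
      have hifA : (if (PySem.Chars.splitOn l ['"']).length > (PySem.Chars.splitOn l ['\'']).length
          then PySem.Chars.splitOn l ['"'] else PySem.Chars.splitOn l ['\''])
          = (csp '"' l).1 :: (csp '"' l).2 := by
        rw [if_pos hA, splitOn_csp]
      have hifB : (if PySem.Str.count joined "\"" > PySem.Str.count joined "'"
          then '"' else '\'') = '"' := if_pos hB
      rw [hifA, hifB, main_core '"' l]
    · have hA : ¬ ((PySem.Chars.splitOn l ['"']).length > (PySem.Chars.splitOn l ['\'']).length) := by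
        omega
      have hB : ¬ (PySem.Str.count joined "\"" > PySem.Str.count joined "'") := by
        rw [hcntD, hcntS]; exact hcmp
      have hifA : (if (PySem.Chars.splitOn l ['"']).length > (PySem.Chars.splitOn l ['\'']).length
          then PySem.Chars.splitOn l ['"'] else PySem.Chars.splitOn l ['\''])
          = (csp '\'' l).1 :: (csp '\'' l).2 := by
        rw [if_neg hA, splitOn_csp]
      have hifB : (if PySem.Str.count joined "\"" > PySem.Str.count joined "'"
          then '"' else '\'') = '\'' := if_neg hB
      rw [hifA, hifB, main_core '\'' l]

-- ===== VERDICT (by name: the statement is the Claim_ definition above) =====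
theorem fix_split_prompts_py_spec : Claim_equal_fix_split_prompts_py := by
  intro prompts _
  unfold Spec_fix_split_prompts_py
  exact fix_split_prompts_py_core prompts
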